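-- pv_equiv track=rewrite | github.com/kongdeju/vcf2anno | acmg/acmg.py | islikelybenigh
-- ===== SOURCE A (Python) =====
-- def islikelybenigh(tags):
-- 	level = 0
-- 	nba = 0
-- 	nbs = 0
-- 	nbp = 0
-- 	for item in tags:
-- 		if item.startswith("BA"):
-- 			nba = nba + 1
-- 	for item in tags:
-- 		if item.startswith("BS"):
-- 			nbs = nbs + 1
-- 	for item in tags:
-- 		if item.startswith("BP"):
-- 			nbp = nbp + 1
-- 	if nbs == 1 and nbp == 1:
-- 		level = 1
-- 		return level
-- 	if nbp >= 2:
-- 		level = 1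
-- 		return level
-- 	return level
-- ===== SOURCE B (Python) =====
-- def islikelybenigh(tags):
--     counts = {}
--     for item in tags:
--         k = item[:2]
--         counts[k] = counts.get(k, 0) + 1
--     nbs = counts.get("BS", 0)
--     nbp = counts.get("BP", 0)
--     return 1 if (nbs == 1 and nbp == 1) or nbp >= 2 else 0
-- ===== Notes on version B (the rewrite author's own statement) =====
-- stated objective: alternative
-- what changed: B builds a dictionary grouping tags by their first-two-character prefix in one pass (no startswith, no per-predicate scans, drops the unused BA count), then reads the BS and BP counts off the dict and returns the decision as one expression instead of A's early-return chain.
import Mathlib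
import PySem

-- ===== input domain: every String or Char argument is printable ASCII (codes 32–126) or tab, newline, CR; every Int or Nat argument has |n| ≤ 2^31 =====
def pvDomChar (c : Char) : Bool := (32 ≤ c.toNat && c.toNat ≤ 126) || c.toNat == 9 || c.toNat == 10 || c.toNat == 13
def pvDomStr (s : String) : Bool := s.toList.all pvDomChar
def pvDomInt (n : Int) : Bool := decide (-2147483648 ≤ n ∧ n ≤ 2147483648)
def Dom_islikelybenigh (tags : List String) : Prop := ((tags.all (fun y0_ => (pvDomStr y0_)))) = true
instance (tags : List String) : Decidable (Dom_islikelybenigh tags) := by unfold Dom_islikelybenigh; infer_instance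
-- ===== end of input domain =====

-- B groups tags by their first-two-character prefix into a dict built in one pass,
-- then reads the "BS"/"BP" counts off the dict (alternative decomposition; drops the unused BA count).

-- ===== PORT A =====
def islikelybenigh (tags : List String) : Int :=
  let nba := tags.foldl (fun a item => if PySem.Str.startswith item "BA" then a + 1 else a) (0 : Int)
  let nbs := tags.foldl (fun a item => if PySem.Str.startswith item "BS" then a + 1 else a) (0 : Int)
  let nbp := tags.foldl (fun a item => if PySem.Str.startswith item "BP" then a + 1 else a) (0 : Int)
  let _ := nba
  if nbs = 1 ∧ nbp = 1 then 1
  else if nbp ≥ 2 then 1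
  else 0

-- ===== PORT B =====
-- counts[item[:2]] = counts.get(item[:2], 0) + 1, then decision from counts.get("BS"/"BP", 0)
def islikelybenigh_alt (tags : List String) : Int :=
  let counts : PySem.Dict String Int :=
    tags.foldl (fun d item =>
      let k := PySem.Str.slice item none (some 2)
      d.insert k (d.getD k 0 + 1)) PySem.Dict.empty
  let nbs := counts.getD "BS" 0
  let nbp := counts.getD "BP" 0
  if (nbs = 1 ∧ nbp = 1) ∨ nbp ≥ 2 then 1 else 0

-- ===== PRECONDITION & SPEC =====
def Spec_islikelybenigh (tags : List String) (out : Int) : Prop := out = islikelybenigh_alt tags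
instance (tags : List String) (out : Int) : Decidable (Spec_islikelybenigh tags out) := by unfold Spec_islikelybenigh; infer_instance

-- ===== CLAIM (what is proved, stated in full; the proofs are below) =====
def Claim_equal_islikelybenigh : Prop := ∀ (tags : List String), Dom_islikelybenigh tags → Spec_islikelybenigh tags (islikelybenigh tags)

-- ===== LEMMAS AND PROOFS =====

-- B's grouping fold is Counter of the mapped prefixes
lemma pv_fold_counter (tags : List String) :
    tags.foldl (fun d item =>
      let k := PySem.Str.slice item none (some 2)
      d.insert k (d.getD k 0 + 1)) PySem.Dict.empty
    = PySem.Dict.counter (tags.map (fun item => PySem.Str.slice item none (some 2))) := by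
  rw [← PySem.Dict.foldl_insert_getD_add_one_eq_counter, List.foldl_map]

-- item[:2] == p  ↔  item.startswith(p), for a two-character p
lemma pv_slice2_eq_startswith (item : String) (p : String) (hp : p.toList.length = 2) :
    (PySem.Str.slice item none (some 2) = p) ↔ PySem.Str.startswith item p = true := by
  rw [PySem.Str.startswith_eq, PySem.Chars.startswith_iff,
      ← String.toList_inj, PySem.Str.toList_slice,
      PySem.Chars.slice_eq_listSlice, PySem.List.slice_to (hb := by norm_num)]
  show item.toList.take (Int.toNat 2) = p.toList ↔ _
  constructor
  · intro h
    rw [← h]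
    exact List.take_prefix _ _
  · intro h
    have := List.prefix_iff_eq_take.mp h
    rw [hp] at this
    simpa using this.symm

-- count of p among prefixes = A's startswith-counting fold
lemma pv_count_eq_fold (tags : List String) (p : String) (hp : p.toList.length = 2) :
    ((tags.map (fun item => PySem.Str.slice item none (some 2))).count p : Int)
    = tags.foldl (fun a item => if PySem.Str.startswith item p then a + 1 else a) (0 : Int) := by
  induction tags using List.reverseRecOn with
  | nil => simp
  | append_singleton xs x ih =>
    rw [List.map_append, List.count_append, List.foldl_append]
    simp only [List.map_cons, List.map_nil, List.count_cons, List.count_nil, List.foldl]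
    by_cases h : PySem.Str.startswith x p = true
    · have : (PySem.Str.slice x none (some 2) == p) = true := by
        simp [((pv_slice2_eq_startswith x p hp).mpr h)]
      simp only [this, h, if_true, Int.natCast_add, Int.natCast_one]
      push_cast
      omega
    · have hf : PySem.Str.startswith x p = false := by
        cases hb : PySem.Str.startswith x p with
        | false => rfl
        | true => exact absurd hb h
      have : (PySem.Str.slice x none (some 2) == p) = false := by
        simp only [beq_eq_false_iff_ne, ne_eq]
        exact fun hc => h ((pv_slice2_eq_startswith x p hp).mp hc)
      simp only [this, hf, Bool.false_eq_true, if_false]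
      push_cast
      omega

-- ===== VERDICT (by name: the statement is the Claim_ definition above) =====
theorem islikelybenigh_spec : Claim_equal_islikelybenigh := by
  intro tags _
  unfold Spec_islikelybenigh islikelybenigh islikelybenigh_alt
  rw [pv_fold_counter]
  simp only [PySem.Dict.getD_counter]
  rw [← pv_count_eq_fold tags "BS" (by decide), ← pv_count_eq_fold tags "BP" (by decide)]
  set s := ((tags.map (fun item => PySem.Str.slice item none (some 2))).count "BS" : Int)
  set q := ((tags.map (fun item => PySem.Str.slice item none (some 2))).count "BP" : Int)
  by_cases h1 : s = 1 <;> by_cases h2 : q = 1 <;> by_cases h3 : (2:Int) ≤ q <;> simp [h1, h2, h3]
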